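-- pv_equiv track=rewrite | github.com/vokbuda/ADM-HW3 | AQ/aq.py | find_path_with_required_cells
-- ===== SOURCE A (Python) =====
-- def find_path_with_required_cells( required_cells):
--     # Before it is necessary to sort array
--     required_cells = sorted(required_cells)
--       # Target cell is the last
--
--     # setup initial position
--     current_x, current_y = 0, 0
--     path = []
--
--     # iterate over cells in sorted array
--     for target_x, target_y in required_cells:
--         # Calculate the differences in x and y
--         delta_x = target_x - current_x
--         delta_y = target_y - current_y
--
--         # If we need to move left or down, it's impossible
--         if delta_x < 0 or delta_y < 0:
--             return "NO"
--
--         # Add 'R' for each step to the right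
--         path.append('R' * delta_x)
--         # Add 'U' for each step up
--         path.append('U' * delta_y)
--
--         # Update the current position
--         current_x, current_y = target_x, target_y
--
--     # print result in case if it is possible
--     return "YES\n" + ''.join(path)
-- ===== SOURCE B (Python) =====
-- def find_path_with_required_cells(required_cells):
--     # A monotone path exists iff no cell is below/left of the origin and every
--     # pair of cells is comparable under the componentwise order (the cells form
--     # a chain); the path then climbs, at each required column, to the highest
--     # required row at or before that column.
--     if any(x < 0 or y < 0 for x, y in required_cells):
--         return "NO"
--     if any((ax - bx) * (ay - by) < 0
--            for i, (ax, ay) in enumerate(required_cells)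
--            for bx, by in required_cells[i + 1:]):
--         return "NO"
--     pieces = ["YES\n"]
--     px, py = 0, 0
--     for x in sorted(set(x for x, _ in required_cells)):
--         y = max(b for a, b in required_cells if a == x)  # column drawn from the cells, so nonempty
--         pieces.append('R' * (x - px) + 'U' * (y - py))
--         px, py = x, y
--     return ''.join(pieces)
-- ===== Notes on version B (the rewrite author's own statement) =====
-- stated objective: alternative
-- what changed: B replaces A's sort-then-walk fused delta-check-and-emit loop by a different characterization: feasibility is decided by an all-pairs componentwise-comparability test (plus a nonnegativity pass, no sorting), and the path string is then built from the per-column maximum row over the sorted distinct column values instead of walking the sorted cell list.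
import Mathlib
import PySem

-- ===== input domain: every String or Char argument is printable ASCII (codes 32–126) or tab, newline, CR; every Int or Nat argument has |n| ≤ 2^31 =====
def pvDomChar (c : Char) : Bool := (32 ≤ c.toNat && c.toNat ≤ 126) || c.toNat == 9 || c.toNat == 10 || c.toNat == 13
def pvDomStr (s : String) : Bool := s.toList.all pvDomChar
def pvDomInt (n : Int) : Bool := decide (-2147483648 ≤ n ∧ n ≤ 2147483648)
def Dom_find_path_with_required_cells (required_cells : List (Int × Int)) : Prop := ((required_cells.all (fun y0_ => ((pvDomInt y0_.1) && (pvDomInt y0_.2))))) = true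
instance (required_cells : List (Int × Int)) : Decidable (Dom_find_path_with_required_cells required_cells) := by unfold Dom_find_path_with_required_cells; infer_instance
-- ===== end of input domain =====

-- B decides feasibility by a pairwise componentwise-comparability test (no sort)
-- and builds the path from per-column maxima over the sorted distinct columns,
-- instead of A's fused delta-check-and-emit walk over the lex-sorted cell list.


-- ===== PORT A =====
-- A's loop: thread (current_x, current_y) and the accumulating list `path`,
-- returning "NO" at the first negative delta.
def pvGoA : List (Int × Int) → Int → Int → List String → String
  | [], _, _, path => "YES\n" ++ PySem.Str.join "" path
  | (tx, ty) :: rest, cx, cy, path =>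
    let dx := tx - cx
    let dy := ty - cy
    if dx < 0 || dy < 0 then "NO"
    else pvGoA rest tx ty (path ++ [String.ofList (PySem.List.pyRepeat ['R'] dx),
                                    String.ofList (PySem.List.pyRepeat ['U'] dy)])

def find_path_with_required_cells (required_cells : List (Int × Int)) : String :=
  pvGoA (PySem.List.sorted2 required_cells Prod.fst Prod.snd false) 0 0 []

-- ===== PORT B =====
-- any((ax - bx) * (ay - by) < 0 for i, (ax, ay) in enumerate(cells) for (bx, by) in cells[i+1:]):
-- each element tested against all later ones.
def pvIncompPairs : List (Int × Int) → Bool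
  | [] => false
  | c :: rest => rest.any (fun d => decide ((c.1 - d.1) * (c.2 - d.2) < 0)) || pvIncompPairs rest

-- max(b for a, b in required_cells if a == x); the column x is always drawn from the
-- cells' first components, so the filtered list is nonempty and Python's max cannot raise
-- (the .getD 0 default is unreachable).
def pvColMax (cells : List (Int × Int)) (x : Int) : Int :=
  (PySem.List.max? ((cells.filter (fun c => c.1 == x)).map Prod.snd) (fun v => v)).getD 0

-- B's build loop over the sorted distinct columns, threading (px, py) and `pieces`.
def pvBuildCols (cells : List (Int × Int)) : List Int → Int → Int → List String → String
  | [], _, _, pieces => PySem.Str.join "" pieces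
  | x :: rest, px, py, pieces =>
    let y := pvColMax cells x
    pvBuildCols cells rest x y
      (pieces ++ [String.ofList (PySem.List.pyRepeat ['R'] (x - px) ++ PySem.List.pyRepeat ['U'] (y - py))])

def find_path_with_required_cells_alt (required_cells : List (Int × Int)) : String :=
  if required_cells.any (fun c => c.1 < 0 || c.2 < 0) then "NO"
  else if pvIncompPairs required_cells then "NO"
  else pvBuildCols required_cells
    (PySem.List.sorted (PySem.Set.ofList (required_cells.map Prod.fst)) (fun v => v) false)
    0 0 ["YES\n"]

-- ===== PRECONDITION & SPEC =====
def Spec_find_path_with_required_cells (required_cells : List (Int × Int)) (out : String) : Prop := out = find_path_with_required_cells_alt required_cells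
instance (required_cells : List (Int × Int)) (out : String) : Decidable (Spec_find_path_with_required_cells required_cells out) := by unfold Spec_find_path_with_required_cells; infer_instance

-- ===== CLAIM (what is proved, stated in full; the proofs are below) =====
def Claim_equal_find_path_with_required_cells : Prop := ∀ (required_cells : List (Int × Int)), Dom_find_path_with_required_cells required_cells → Spec_find_path_with_required_cells required_cells (find_path_with_required_cells required_cells)

-- ===== LEMMAS AND PROOFS =====

-- componentwise order on cells: b is reachable from a by R/U moves
def pvCompLe (a b : Int × Int) : Prop := a.1 ≤ b.1 ∧ a.2 ≤ b.2

-- lexicographic order on cells (Python's tuple sort order)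
def pvLexLe (a b : Int × Int) : Prop := a.1 < b.1 ∨ (a.1 = b.1 ∧ a.2 ≤ b.2)

-- the character string emitted by walking the given waypoints from (px, py)
def pvStrOf : List (Int × Int) → Int → Int → List Char
  | [], _, _ => []
  | (x, y) :: t, px, py =>
    PySem.List.pyRepeat ['R'] (x - px) ++ PySem.List.pyRepeat ['U'] (y - py) ++ pvStrOf t x y

-- last cell of each maximal run of equal first components
def pvGroupLast : List (Int × Int) → List (Int × Int)
  | [] => []
  | [a] => [a]
  | a :: b :: t => if a.1 = b.1 then pvGroupLast (b :: t) else a :: pvGroupLast (b :: t)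

lemma pv_join_nil_flatten (xs : List String) :
    PySem.Str.join "" xs = String.ofList ((xs.map String.toList).flatten) := by
  simp [PySem.Str.join, PySem.Chars.join, List.intercalate]
  congr 1
  induction (xs.map String.toList) with
  | nil => rfl
  | cons a t ih => cases t <;> simp_all [List.intersperse]

lemma pv_append_ofList (s : String) (l : List Char) :
    s ++ String.ofList l = String.ofList (s.toList ++ l) := by
  have h1 : (s ++ String.ofList l).toList = s.toList ++ l := by simp
  rw [← h1, String.ofList_toList]

lemma pvCompLe_trans {a b c : Int × Int} (h1 : pvCompLe a b) (h2 : pvCompLe b c) : pvCompLe a c := by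
  unfold pvCompLe at *; omega

lemma pvGoA_no (l : List (Int × Int)) : ∀ (cx cy : Int) (path : List String),
    ¬ List.IsChain pvCompLe ((cx, cy) :: l) → pvGoA l cx cy path = "NO" := by
  induction l with
  | nil => intro cx cy path hc; exact absurd (List.isChain_singleton _) hc
  | cons hd t ih =>
    intro cx cy path hc
    obtain ⟨tx, ty⟩ := hd
    rw [pvGoA]
    by_cases hneg : tx - cx < 0 ∨ ty - cy < 0
    · rw [if_pos (by simpa using hneg)]
    · push_neg at hneg
      rw [if_neg (by simpa using hneg)]
      apply ih
      intro hch
      exact hc (List.isChain_cons_cons.mpr ⟨⟨by omega, by omega⟩, hch⟩)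

lemma pvGoA_yes (l : List (Int × Int)) : ∀ (cx cy : Int) (path : List String),
    List.IsChain pvCompLe ((cx, cy) :: l) →
    pvGoA l cx cy path = "YES\n" ++ String.ofList ((path.map String.toList).flatten ++ pvStrOf l cx cy) := by
  induction l with
  | nil =>
    intro cx cy path _
    rw [pvGoA, pv_join_nil_flatten]
    simp [pvStrOf]
  | cons hd t ih =>
    intro cx cy path hc
    obtain ⟨tx, ty⟩ := hd
    rw [List.isChain_cons_cons] at hc
    obtain ⟨⟨h1, h2⟩, hch⟩ := hc
    rw [pvGoA]
    rw [if_neg (by simp; omega)]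
    rw [ih _ _ _ hch]
    congr 1
    simp [pvStrOf, List.append_assoc]

lemma pvBuild_eq (cells : List (Int × Int)) (cols : List Int) : ∀ (px py : Int) (pieces : List String),
    pvBuildCols cells cols px py pieces =
      String.ofList ((pieces.map String.toList).flatten ++
        pvStrOf (cols.map (fun x => (x, pvColMax cells x))) px py) := by
  induction cols with
  | nil => intro px py pieces; rw [pvBuildCols, pv_join_nil_flatten]; simp [pvStrOf]
  | cons x rest ih =>
    intro px py pieces
    rw [pvBuildCols, ih]
    congr 1
    simp [pvStrOf, List.append_assoc]

lemma pvIncomp_iff (a b : Int × Int) :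
    ((a.1 - b.1) * (a.2 - b.2) < 0) ↔ ¬ (pvCompLe a b ∨ pvCompLe b a) := by
  rw [mul_neg_iff]
  unfold pvCompLe
  omega

lemma pvIncompPairs_false_iff (l : List (Int × Int)) :
    pvIncompPairs l = false ↔ l.Pairwise (fun a b => pvCompLe a b ∨ pvCompLe b a) := by
  induction l with
  | nil => simp [pvIncompPairs]
  | cons c rest ih =>
    rw [pvIncompPairs]
    simp only [Bool.or_eq_false_iff, List.any_eq_false, List.pairwise_cons, ih,
      decide_eq_true_eq]
    constructor
    · rintro ⟨h1, h2⟩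
      exact ⟨fun a ha => not_not.mp (fun hn => (h1 a ha) ((pvIncomp_iff c a).mpr hn)), h2⟩
    · rintro ⟨h1, h2⟩
      exact ⟨fun a ha hlt => ((pvIncomp_iff c a).mp hlt) (h1 a ha), h2⟩

lemma pv_insertBy_pairwise {α : Type} (R : α → α → Prop) (before : α → α → Bool)
    (h1 : ∀ a b, before a b = true → R a b) (h2 : ∀ a b, before a b = false → R b a)
    (ht : ∀ a b c, R a b → R b c → R a c) (x : α) :
    ∀ l : List α, l.Pairwise R → (PySem.List.insertBy before x l).Pairwise R := by
  intro l
  induction l with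
  | nil => intro _; simp [PySem.List.insertBy]
  | cons y ys ih =>
    intro hp
    rw [List.pairwise_cons] at hp
    obtain ⟨hy, hys⟩ := hp
    rw [PySem.List.insertBy]
    by_cases hb : before x y = true
    · rw [if_pos hb]
      refine List.pairwise_cons.mpr ⟨?_, List.pairwise_cons.mpr ⟨hy, hys⟩⟩
      intro z hz
      rcases List.mem_cons.mp hz with rfl | hz'
      · exact h1 _ _ hb
      · exact ht _ _ _ (h1 _ _ hb) (hy _ hz')
    · rw [if_neg hb]
      refine List.pairwise_cons.mpr ⟨?_, ih hys⟩
      intro z hz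
      rcases (PySem.List.mem_insertBy _ _ _ _).mp hz with rfl | hz'
      · exact h2 _ _ (by simpa using hb)
      · exact hy _ hz'

lemma pv_sorted2_pairwise (cells : List (Int × Int)) :
    (PySem.List.sorted2 cells Prod.fst Prod.snd false).Pairwise pvLexLe := by
  rw [PySem.List.sorted2]
  simp only [if_neg (by simp : ¬ (false = true))]
  have aux : ∀ (xs acc : List (Int × Int)), acc.Pairwise pvLexLe →
      (xs.foldl (fun acc x => PySem.List.insertBy
        (fun a b => decide (a.1 < b.1) || !decide (b.1 < a.1) && decide (a.2 < b.2)) x acc) acc).Pairwise pvLexLe := by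
    intro xs
    induction xs with
    | nil => intro acc h; exact h
    | cons z zs ih =>
      intro acc h
      refine ih _ ?_
      apply pv_insertBy_pairwise pvLexLe
      · intro a b hb; simp only [Bool.or_eq_true, Bool.and_eq_true, Bool.not_eq_true',
          decide_eq_true_eq, decide_eq_false_iff_not] at hb
        unfold pvLexLe; omega
      · intro a b hb; simp only [Bool.or_eq_false_iff, Bool.and_eq_false_iff, Bool.not_eq_false',
          decide_eq_false_iff_not, decide_eq_true_eq] at hb
        unfold pvLexLe; omega
      · intro a b c hab hbc; unfold pvLexLe at *; omega
      · exact h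
  exact aux cells [] List.Pairwise.nil

lemma pv_mem_groupLast : ∀ (l : List (Int × Int)) (p : Int × Int), p ∈ pvGroupLast l → p ∈ l := by
  intro l
  induction l with
  | nil => intro p h; simpa [pvGroupLast] using h
  | cons a t ih =>
    intro p h
    cases t with
    | nil => simpa [pvGroupLast] using h
    | cons b t' =>
      rw [pvGroupLast] at h
      by_cases he : a.1 = b.1
      · rw [if_pos he] at h
        exact List.mem_cons_of_mem _ (ih _ h)
      · rw [if_neg he] at h
        rcases List.mem_cons.mp h with rfl | h'
        · exact List.mem_cons_self
        · exact List.mem_cons_of_mem _ (ih _ h')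

lemma pv_mem_groupLast_keys : ∀ (l : List (Int × Int)) (x : Int),
    x ∈ l.map Prod.fst → x ∈ (pvGroupLast l).map Prod.fst := by
  intro l
  induction l with
  | nil => intro x h; simpa using h
  | cons a t ih =>
    intro x h
    cases t with
    | nil => simpa [pvGroupLast] using h
    | cons b t' =>
      rw [pvGroupLast]
      by_cases he : a.1 = b.1
      · rw [if_pos he]
        rcases List.mem_cons.mp h with rfl | h'
        · exact ih _ (by simp [← he])
        · exact ih _ h'
      · rw [if_neg he]
        rcases List.mem_cons.mp h with rfl | h'
        · simp
        · simp only [List.map_cons, List.mem_cons]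
          exact Or.inr (ih _ h')

lemma pvLexLe_fst_le {a b : Int × Int} (h : pvLexLe a b) : a.1 ≤ b.1 := by
  unfold pvLexLe at h; omega

lemma pv_groupLast_keys_lt : ∀ (l : List (Int × Int)), l.Pairwise pvLexLe →
    (pvGroupLast l).Pairwise (fun p q => p.1 < q.1) := by
  intro l
  induction l with
  | nil => intro _; simp [pvGroupLast]
  | cons a t ih =>
    intro hp
    rw [List.pairwise_cons] at hp
    obtain ⟨ha, ht⟩ := hp
    cases t with
    | nil => simp [pvGroupLast]
    | cons b t' =>
      rw [pvGroupLast]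
      by_cases he : a.1 = b.1
      · rw [if_pos he]; exact ih ht
      · rw [if_neg he]
        refine List.pairwise_cons.mpr ⟨?_, ih ht⟩
        intro q hq
        have hq' := pv_mem_groupLast _ _ hq
        have hab : a.1 < b.1 := by
          have := ha b List.mem_cons_self
          unfold pvLexLe at this; omega
        rcases List.mem_cons.mp hq' with rfl | hq''
        · exact hab
        · have := List.pairwise_cons.mp ht
          have hbq := this.1 q hq''
          have := pvLexLe_fst_le hbq
          omega

lemma pv_groupLast_ub : ∀ (l : List (Int × Int)), l.Pairwise pvLexLe →
    ∀ p ∈ pvGroupLast l, ∀ q ∈ l, q.1 = p.1 → q.2 ≤ p.2 := by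
  intro l
  induction l with
  | nil => intro _ p hp; simp [pvGroupLast] at hp
  | cons a t ih =>
    intro hp p hpg q hq hqp
    rw [List.pairwise_cons] at hp
    obtain ⟨ha, ht⟩ := hp
    cases t with
    | nil =>
      simp [pvGroupLast] at hpg
      subst hpg
      rcases List.mem_cons.mp hq with rfl | hq'
      · omega
      · simp at hq'
    | cons b t' =>
      rw [pvGroupLast] at hpg
      by_cases he : a.1 = b.1
      · rw [if_pos he] at hpg
        rcases List.mem_cons.mp hq with rfl | hq'
        · -- q = a : a.2 ≤ p.2 from pvLexLe a p with equal firsts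
          have hpmem := pv_mem_groupLast _ _ hpg
          have := ha p hpmem
          unfold pvLexLe at this; omega
        · exact ih ht p hpg q hq' hqp
      · rw [if_neg he] at hpg
        have hab : a.1 < b.1 := by
          have := ha b List.mem_cons_self
          unfold pvLexLe at this; omega
        have hble : ∀ z ∈ b :: t', b.1 ≤ z.1 := by
          intro z hz
          rcases List.mem_cons.mp hz with rfl | hz'
          · omega
          · exact pvLexLe_fst_le ((List.pairwise_cons.mp ht).1 z hz')
        rcases List.mem_cons.mp hpg with rfl | hpg'
        · rcases List.mem_cons.mp hq with rfl | hq'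
          · omega
          · have := hble q hq'; omega
        · have hpmem := pv_mem_groupLast _ _ hpg'
          rcases List.mem_cons.mp hq with rfl | hq'
          · have := hble p hpmem; omega
          · exact ih ht p hpg' q hq' hqp

lemma pv_max_id_eq (l : List Int) (m : Int) (hm : m ∈ l) (hub : ∀ y ∈ l, y ≤ m) :
    PySem.List.max? l (fun v => v) = some m := by
  cases h : PySem.List.max? l (fun v => v) with
  | none =>
    rw [PySem.List.max?_eq_none_iff] at h
    subst h; simp at hm
  | some k =>
    have hk := PySem.List.max?_mem h
    have hmax := PySem.List.max?_isMax h
    have h1 : k ≤ m := hub k hk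
    have h2 : m ≤ k := hmax m hm
    have : k = m := le_antisymm h1 h2
    rw [this]

lemma pv_colMax_eq (cells S : List (Int × Int)) (hperm : S.Perm cells) (p : Int × Int)
    (hmem : p ∈ S) (hub : ∀ q ∈ S, q.1 = p.1 → q.2 ≤ p.2) :
    pvColMax cells p.1 = p.2 := by
  unfold pvColMax
  have hm : p.2 ∈ (cells.filter (fun c => c.1 == p.1)).map Prod.snd := by
    simp only [List.mem_map, List.mem_filter]
    exact ⟨p, ⟨hperm.mem_iff.mp hmem, by simp⟩, rfl⟩
  have hu : ∀ y ∈ (cells.filter (fun c => c.1 == p.1)).map Prod.snd, y ≤ p.2 := by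
    intro y hy
    simp only [List.mem_map, List.mem_filter] at hy
    obtain ⟨q, ⟨hq1, hq2⟩, rfl⟩ := hy
    exact hub q (hperm.mem_iff.mpr hq1) (by simpa using hq2)
  rw [pv_max_id_eq _ _ hm hu]
  rfl

lemma pv_strOf_groupLast : ∀ (l : List (Int × Int)) (px py : Int),
    List.IsChain pvCompLe ((px, py) :: l) → pvStrOf l px py = pvStrOf (pvGroupLast l) px py := by
  intro l
  induction l with
  | nil => intro px py _; rfl
  | cons a t ih =>
    intro px py hc
    cases t with
    | nil => rfl
    | cons b t' =>
      rw [List.isChain_cons_cons] at hc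
      obtain ⟨h0, hc1⟩ := hc
      have hc1' := hc1
      rw [List.isChain_cons_cons] at hc1'
      obtain ⟨hab, hc2⟩ := hc1'
      rw [pvGroupLast]
      by_cases he : a.1 = b.1
      · rw [if_pos he]
        have hchain : List.IsChain pvCompLe ((px, py) :: b :: t') :=
          List.isChain_cons_cons.mpr ⟨pvCompLe_trans h0 hab, hc2⟩
        rw [← ih px py hchain]
        -- merge the two segments: a.1 = b.1, so the runs of 'U' concatenate
        obtain ⟨ax, ay⟩ := a
        obtain ⟨bx, by'⟩ := b
        unfold pvCompLe at h0 hab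
        simp only at he h0 hab
        obtain ⟨h01, h02⟩ := h0
        obtain ⟨h11, h12⟩ := hab
        have hn : (ay - py).toNat + (by' - ay).toNat = (by' - py).toNat := by omega
        subst he
        simp only [pvStrOf, PySem.List.pyRepeat_singleton, sub_self, Int.toNat_zero,
          List.replicate_zero, List.nil_append, List.append_assoc]
        rw [← List.append_assoc (List.replicate (ay - py).toNat 'U')
          (List.replicate (by' - ay).toNat 'U'), ← List.replicate_add, hn]
      · rw [if_neg he]
        obtain ⟨ax, ay⟩ := a
        have hrec := ih ax ay hc1
        simp only [pvStrOf] at hrec ⊢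
        rw [← hrec]

lemma pv_alt_no_of_checks (cells : List (Int × Int))
    (h : cells.any (fun c => c.1 < 0 || c.2 < 0) = true ∨ pvIncompPairs cells = true) :
    find_path_with_required_cells_alt cells = "NO" := by
  unfold find_path_with_required_cells_alt
  rcases h with h | h
  · rw [h]; simp
  · rw [h]
    by_cases h2 : cells.any (fun c => c.1 < 0 || c.2 < 0) = true
    · rw [h2]; simp
    · simp only [Bool.not_eq_true] at h2
      rw [h2]; simp

-- ===== VERDICT (by name: the statement is the Claim_ definition above) =====
theorem find_path_with_required_cells_spec : Claim_equal_find_path_with_required_cells := by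
  intro cells _dom
  show find_path_with_required_cells cells = find_path_with_required_cells_alt cells
  unfold find_path_with_required_cells
  set S := PySem.List.sorted2 cells Prod.fst Prod.snd false with hS
  have hperm : S.Perm cells := PySem.List.sorted2_perm cells Prod.fst Prod.snd false
  have hpair : S.Pairwise pvLexLe := pv_sorted2_pairwise cells
  by_cases hc : List.IsChain pvCompLe (((0, 0) : Int × Int) :: S)
  · -- feasible: both sides print YES plus the same move string
    have hpw : List.Pairwise pvCompLe (((0, 0) : Int × Int) :: S) := by
      letI : Trans pvCompLe pvCompLe pvCompLe := ⟨fun h1 h2 => pvCompLe_trans h1 h2⟩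
      exact List.isChain_iff_pairwise.mp hc
    rw [List.pairwise_cons] at hpw
    obtain ⟨hnnS, hpwS⟩ := hpw
    have hcompC : cells.Pairwise (fun a b => pvCompLe a b ∨ pvCompLe b a) :=
      (hpwS.imp (fun h => Or.inl h)).perm hperm (fun h => h.symm)
    have hany : cells.any (fun c => c.1 < 0 || c.2 < 0) = false := by
      simp only [List.any_eq_false]
      intro c hcm
      have := hnnS c (hperm.mem_iff.mpr hcm)
      unfold pvCompLe at this
      simp only [Bool.or_eq_true, decide_eq_true_eq, not_or]
      omega
    have hincf : pvIncompPairs cells = false := (pvIncompPairs_false_iff cells).mpr hcompC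
    unfold find_path_with_required_cells_alt
    rw [hany, hincf]
    simp only [Bool.false_eq_true, if_false]
    have hkeys : PySem.List.sorted (PySem.Set.ofList (cells.map Prod.fst)) (fun v => v) false
        = (pvGroupLast S).map Prod.fst := by
      apply PySem.List.sorted_eq_of_perm_of_pairwise_lt
      · apply List.perm_of_nodup_nodup_toFinset_eq
        · exact (List.pairwise_map.mpr (pv_groupLast_keys_lt S hpair)).imp
            (fun h => ne_of_lt h)
        · exact PySem.Set.nodup_ofList _
        · ext z
          simp only [List.mem_toFinset, PySem.Set.mem_ofList]
          constructor
          · intro h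
            obtain ⟨p, hp, rfl⟩ := List.mem_map.mp h
            exact List.mem_map.mpr ⟨p, hperm.mem_iff.mp (pv_mem_groupLast _ _ hp), rfl⟩
          · intro h
            apply pv_mem_groupLast_keys
            obtain ⟨p, hp, rfl⟩ := List.mem_map.mp h
            exact List.mem_map.mpr ⟨p, hperm.mem_iff.mpr hp, rfl⟩
      · exact List.pairwise_map.mpr (pv_groupLast_keys_lt S hpair)
    have hmapeq : ((pvGroupLast S).map Prod.fst).map (fun x => (x, pvColMax cells x))
        = pvGroupLast S := by
      rw [List.map_map]
      conv_rhs => rw [← List.map_id (pvGroupLast S)]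
      apply List.map_congr_left
      intro p hp
      have h2 := pv_colMax_eq cells S hperm p (pv_mem_groupLast _ _ hp)
        (pv_groupLast_ub S hpair p hp)
      simp only [Function.comp_apply, id_eq]
      rw [h2]
    rw [pvGoA_yes S 0 0 [] hc, pvBuild_eq, pv_append_ofList, hkeys, hmapeq,
      ← pv_strOf_groupLast S 0 0 hc]
    simp
  · -- infeasible: A prints NO, and one of B's two checks fires
    rw [pvGoA_no S 0 0 [] hc]
    by_cases hany : cells.any (fun c => c.1 < 0 || c.2 < 0) = true
    · exact (pv_alt_no_of_checks cells (Or.inl hany)).symm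
    · by_cases hinc2 : pvIncompPairs cells = true
      · exact (pv_alt_no_of_checks cells (Or.inr hinc2)).symm
      · exfalso
        apply hc
        rw [Bool.not_eq_true] at hany hinc2
        have hinc := hinc2
        have hcompC := (pvIncompPairs_false_iff cells).mp hinc
        have hcompS : S.Pairwise (fun a b => pvCompLe a b ∨ pvCompLe b a) :=
          hcompC.perm hperm.symm (fun h => h.symm)
        have hpwS : S.Pairwise pvCompLe := (hcompS.and hpair).imp (fun h => by
          rcases h.1 with hcl | hcl
          · exact hcl
          · have hl := h.2
            unfold pvCompLe at *
            unfold pvLexLe at hl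
            omega)
        have hnnS : ∀ c ∈ S, pvCompLe (0, 0) c := by
          intro c hcm
          rw [List.any_eq_false] at hany
          have := hany c (hperm.mem_iff.mp hcm)
          unfold pvCompLe
          simp only [Bool.or_eq_true, decide_eq_true_eq, not_or] at this
          constructor <;> [exact le_of_not_gt this.1; exact le_of_not_gt this.2]
        exact List.Pairwise.isChain (List.pairwise_cons.mpr ⟨hnnS, hpwS⟩)
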